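-- pv_equiv track=rewrite | github.com/vskh/neuron | teacher.py | __cvt_vector_to_conf
-- ===== SOURCE A (Python) =====
-- def __cvt_vector_to_conf(vector, shape):
--     conf = []
--     pos = 0
--     for layer in shape:
--         layer_neuron_weights = []
--         for neuron in layer:
--             neuron_weights = vector[pos:pos+len(neuron)]
--             pos += len(neuron)
--             layer_neuron_weights.append(neuron_weights)
--         conf.append(layer_neuron_weights)
--     return conf
-- ===== SOURCE B (Python) =====
-- def __cvt_vector_to_conf(vector, shape):
--     # Precompute cumulative cut points for every neuron, then map them onto
--     # the nested shape with comprehensions instead of threading a mutable pos.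
--     offsets = [0]
--     for layer in shape:
--         for neuron in layer:
--             offsets.append(offsets[-1] + len(neuron))
--     conf = []
--     i = 0
--     for layer in shape:
--         conf.append([vector[offsets[i + j]:offsets[i + j + 1]] for j in range(len(layer))])
--         i += len(layer)
--     return conf
-- ===== Notes on version B (the rewrite author's own statement) =====
-- stated objective: alternative
-- what changed: B precomputes a flat cumulative offset table of neuron weight-counts once, then builds the nested output by slicing the vector at consecutive cut points via indexed comprehensions, instead of threading a mutable running position through nested append loops.
import Mathlib
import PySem

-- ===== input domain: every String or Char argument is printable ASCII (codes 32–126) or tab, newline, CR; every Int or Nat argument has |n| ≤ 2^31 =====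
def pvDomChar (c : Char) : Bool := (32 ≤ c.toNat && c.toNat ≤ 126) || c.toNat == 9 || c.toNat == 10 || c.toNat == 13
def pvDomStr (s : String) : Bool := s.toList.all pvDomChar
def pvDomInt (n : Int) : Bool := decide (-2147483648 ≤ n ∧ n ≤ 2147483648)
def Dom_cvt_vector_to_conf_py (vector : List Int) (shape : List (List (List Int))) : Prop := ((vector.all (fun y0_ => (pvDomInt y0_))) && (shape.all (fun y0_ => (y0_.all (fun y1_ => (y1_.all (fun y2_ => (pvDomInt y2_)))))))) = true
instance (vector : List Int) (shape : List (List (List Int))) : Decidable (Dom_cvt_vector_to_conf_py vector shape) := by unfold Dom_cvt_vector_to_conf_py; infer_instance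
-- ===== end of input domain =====

-- B precomputes a flat cumulative offset table once and builds the output by indexed
-- comprehensions over the cut points (alternative decomposition; same cost).

-- ===== PORT A =====
def cvt_vector_to_conf_py (vector : List Int) (shape : List (List (List Int))) : List (List (List Int)) :=
  (shape.foldl (fun (st : List (List (List Int)) × Int) layer =>
     let inner := layer.foldl (fun (st2 : List (List Int) × Int) neuron =>
        (st2.1 ++ [PySem.List.slice vector (some st2.2) (some (st2.2 + (neuron.length : Int)))],
         st2.2 + (neuron.length : Int))) (([] : List (List Int)), st.2)
     (st.1 ++ [inner.1], inner.2)) (([] : List (List (List Int))), (0 : Int))).1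

-- ===== PORT B =====
def cvt_vector_to_conf_py_alt (vector : List Int) (shape : List (List (List Int))) : List (List (List Int)) :=
  let offsets : List Int := shape.foldl (fun acc layer =>
      layer.foldl (fun acc2 neuron => acc2 ++ [acc2.getLastD 0 + (neuron.length : Int)]) acc) [0]
  (shape.foldl (fun (st : List (List (List Int)) × Int) layer =>
     (st.1 ++ [(PySem.List.pyRange 0 (layer.length : Int) 1).map (fun j =>
         PySem.List.slice vector (some (PySem.List.pyGetD offsets (st.2 + j) 0))
                                 (some (PySem.List.pyGetD offsets (st.2 + j + 1) 0)))],
      st.2 + (layer.length : Int))) (([] : List (List (List Int))), (0 : Int))).1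

-- ===== PRECONDITION & SPEC =====
def Spec_cvt_vector_to_conf_py (vector : List Int) (shape : List (List (List Int))) (out : List (List (List Int))) : Prop := out = cvt_vector_to_conf_py_alt vector shape
instance (vector : List Int) (shape : List (List (List Int))) (out : List (List (List Int))) : Decidable (Spec_cvt_vector_to_conf_py vector shape out) := by unfold Spec_cvt_vector_to_conf_py; infer_instance

-- ===== CLAIM (what is proved, stated in full; the proofs are below) =====
def Claim_equal_cvt_vector_to_conf_py : Prop := ∀ (vector : List Int) (shape : List (List (List Int))), Dom_cvt_vector_to_conf_py vector shape → Spec_cvt_vector_to_conf_py vector shape (cvt_vector_to_conf_py vector shape)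

-- ===== LEMMAS AND PROOFS =====

/-- Sum of the lengths of the neurons in a flat list, as `Int`. -/
def sumL (l : List (List Int)) : Int := (l.map (fun n => (n.length : Int))).sum

@[simp] lemma sumL_nil : sumL [] = 0 := rfl
@[simp] lemma sumL_cons (n : List Int) (l : List (List Int)) :
    sumL (n :: l) = (n.length : Int) + sumL l := by simp [sumL]
@[simp] lemma sumL_append (a b : List (List Int)) : sumL (a ++ b) = sumL a + sumL b := by
  simp [sumL]

/-- Canonical per-layer result: slices of `v` at running position `pos`. -/
def layerSlices (v : List Int) (pos : Int) : List (List Int) → List (List Int)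
  | [] => []
  | n :: l => PySem.List.slice v (some pos) (some (pos + (n.length : Int))) ::
      layerSlices v (pos + (n.length : Int)) l

/-- Canonical whole result. -/
def confSpec (v : List Int) (pos : Int) : List (List (List Int)) → List (List (List Int))
  | [] => []
  | layer :: rest => layerSlices v pos layer :: confSpec v (pos + sumL layer) rest

-- ---- A characterisation ----

lemma A_inner (v : List Int) (layer : List (List Int)) :
    ∀ (acc : List (List Int)) (pos : Int),
    layer.foldl (fun (st2 : List (List Int) × Int) neuron =>
        (st2.1 ++ [PySem.List.slice v (some st2.2) (some (st2.2 + (neuron.length : Int)))],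
         st2.2 + (neuron.length : Int))) (acc, pos)
      = (acc ++ layerSlices v pos layer, pos + sumL layer) := by
  induction layer with
  | nil => intro acc pos; simp [layerSlices]
  | cons n l ih =>
      intro acc pos
      simp only [List.foldl_cons, ih, layerSlices, sumL_cons, Prod.mk.injEq]
      refine ⟨by simp, by ring⟩

lemma A_outer_simple (v : List Int) (shape : List (List (List Int))) :
    ∀ (acc : List (List (List Int))) (pos : Int),
    shape.foldl (fun (st : List (List (List Int)) × Int) layer =>
        (st.1 ++ [layerSlices v st.2 layer], st.2 + sumL layer)) (acc, pos)
      = (acc ++ confSpec v pos shape, pos + sumL (shape.flatMap id)) := by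
  induction shape with
  | nil => intro acc pos; simp [confSpec]
  | cons layer rest ih =>
      intro acc pos
      simp only [List.foldl_cons, ih, confSpec, Prod.mk.injEq]
      refine ⟨by simp, by simp [List.flatMap_cons]; ring⟩

lemma A_outer (v : List Int) (shape : List (List (List Int))) :
    shape.foldl (fun (st : List (List (List Int)) × Int) layer =>
       let inner := layer.foldl (fun (st2 : List (List Int) × Int) neuron =>
          (st2.1 ++ [PySem.List.slice v (some st2.2) (some (st2.2 + (neuron.length : Int)))],
           st2.2 + (neuron.length : Int))) (([] : List (List Int)), st.2)
       (st.1 ++ [inner.1], inner.2)) (([] : List (List (List Int))), (0 : Int))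
      = ([] ++ confSpec v 0 shape, 0 + sumL (shape.flatMap id)) := by
  have hfun : (fun (st : List (List (List Int)) × Int) layer =>
       let inner := layer.foldl (fun (st2 : List (List Int) × Int) neuron =>
          (st2.1 ++ [PySem.List.slice v (some st2.2) (some (st2.2 + (neuron.length : Int)))],
           st2.2 + (neuron.length : Int))) (([] : List (List Int)), st.2)
       (st.1 ++ [inner.1], inner.2))
      = (fun (st : List (List (List Int)) × Int) layer =>
          (st.1 ++ [layerSlices v st.2 layer], st.2 + sumL layer)) := by
    funext st layer
    simp [A_inner]
  rw [hfun, A_outer_simple]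

-- ---- B characterisation ----

/-- Prefix sums of neuron lengths starting from base `b` (excluding `b` itself). -/
def prefAdd (b : Int) : List (List Int) → List Int
  | [] => []
  | n :: l => (b + (n.length : Int)) :: prefAdd (b + (n.length : Int)) l

lemma offsets_inner (l : List (List Int)) :
    ∀ (acc : List Int) (b : Int),
    l.foldl (fun acc2 neuron => acc2 ++ [acc2.getLastD 0 + (neuron.length : Int)]) (acc ++ [b])
      = (acc ++ [b]) ++ prefAdd b l := by
  induction l with
  | nil => intro acc b; simp [prefAdd]
  | cons n l ih =>
      intro acc b
      simp only [List.foldl_cons, List.getLastD_concat, prefAdd]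
      have := ih (acc ++ [b]) (b + (n.length : Int))
      simpa [List.append_assoc] using this

lemma offsets_flatten (shape : List (List (List Int))) :
    ∀ (acc : List Int),
    shape.foldl (fun acc layer =>
        layer.foldl (fun acc2 neuron => acc2 ++ [acc2.getLastD 0 + (neuron.length : Int)]) acc) acc
      = (shape.flatMap id).foldl
          (fun acc2 neuron => acc2 ++ [acc2.getLastD 0 + (neuron.length : Int)]) acc := by
  induction shape with
  | nil => intro acc; simp
  | cons layer rest ih =>
      intro acc
      rw [List.flatMap_cons, List.foldl_append, List.foldl_cons]
      exact ih _

lemma offsets_eq (shape : List (List (List Int))) :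
    shape.foldl (fun acc layer =>
        layer.foldl (fun acc2 neuron => acc2 ++ [acc2.getLastD 0 + (neuron.length : Int)]) acc) [0]
      = 0 :: prefAdd 0 (shape.flatMap id) := by
  rw [offsets_flatten]
  have := offsets_inner (shape.flatMap id) [] 0
  simpa using this

lemma lookup_offsets (flat : List (List Int)) :
    ∀ (k : Nat) (b : Int), k ≤ flat.length →
    PySem.List.pyGetD (b :: prefAdd b flat) ((k : Nat) : Int) 0 = b + sumL (flat.take k) := by
  induction flat with
  | nil =>
      intro k b hk
      have hk0 : k = 0 := by simpa using hk
      subst hk0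
      simp
  | cons n l ih =>
      intro k b hk
      cases k with
      | zero => simp
      | succ k =>
          have h := ih k (b + (n.length : Int)) (by simpa using hk)
          simp only [PySem.List.pyGetD_natCast, List.getD] at h ⊢
          simp only [prefAdd, List.take_succ_cons, sumL_cons]
          simpa [add_assoc] using h

lemma range_slices (v : List Int) (layer : List (List Int)) :
    ∀ (p0 : Int),
    (List.range layer.length).map (fun jn =>
        PySem.List.slice v (some (p0 + sumL (layer.take jn)))
                           (some (p0 + sumL (layer.take (jn + 1)))))
      = layerSlices v p0 layer := by
  induction layer with
  | nil => intro p0; simp [layerSlices]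
  | cons n l ih =>
      intro p0
      simp only [List.length_cons, List.range_succ_eq_map, List.map_cons, List.map_map,
        layerSlices, List.cons.injEq]
      refine ⟨by simp, ?_⟩
      rw [← ih (p0 + (n.length : Int))]
      apply List.map_congr_left
      intro jn _
      simp only [Function.comp, Nat.succ_eq_add_one, List.take_succ_cons, sumL_cons, ← add_assoc]

lemma B_outer (v : List Int) (flat : List (List Int)) :
    ∀ (rest : List (List (List Int))) (prev : List (List Int)) (conf : List (List (List Int))),
    flat = prev ++ rest.flatMap id →
    (rest.foldl (fun (st : List (List (List Int)) × Int) layer =>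
       (st.1 ++ [(PySem.List.pyRange 0 (layer.length : Int) 1).map (fun j =>
           PySem.List.slice v (some (PySem.List.pyGetD (0 :: prefAdd 0 flat) (st.2 + j) 0))
                               (some (PySem.List.pyGetD (0 :: prefAdd 0 flat) (st.2 + j + 1) 0)))],
        st.2 + (layer.length : Int))) (conf, (prev.length : Int))).1
      = conf ++ confSpec v (sumL prev) rest := by
  intro rest
  induction rest with
  | nil => intro prev conf _; simp [confSpec]
  | cons layer rest ih =>
      intro prev conf hf
      have hf' : flat = (prev ++ layer) ++ rest.flatMap id := by
        simp [hf, List.flatMap_cons, List.append_assoc]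
      have hmap : (PySem.List.pyRange 0 (layer.length : Int) 1).map (fun j =>
           PySem.List.slice v (some (PySem.List.pyGetD (0 :: prefAdd 0 flat) ((prev.length : Int) + j) 0))
                               (some (PySem.List.pyGetD (0 :: prefAdd 0 flat) ((prev.length : Int) + j + 1) 0)))
          = layerSlices v (sumL prev) layer := by
        rw [PySem.List.pyRange_zero_natCast, List.map_map, ← range_slices v layer (sumL prev)]
        apply List.map_congr_left
        intro jn hjn
        have hjn' : jn < layer.length := List.mem_range.mp hjn
        have h1 : (prev.length : Int) + (jn : Int) = (((prev.length + jn : Nat)) : Int) := by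
          push_cast; ring
        have h2 : (((prev.length + jn : Nat)) : Int) + 1 = (((prev.length + jn + 1 : Nat)) : Int) := by
          push_cast; ring
        have hk1 : prev.length + jn ≤ flat.length := by
          rw [hf]; simp [List.flatMap_cons, List.length_append]; omega
        have hk2 : prev.length + jn + 1 ≤ flat.length := by
          rw [hf]; simp [List.flatMap_cons, List.length_append]; omega
        have ht1 : flat.take (prev.length + jn) = prev ++ layer.take jn := by
          rw [hf, List.flatMap_cons]
          simp only [id_eq]
          rw [List.take_append, List.take_of_length_le (by omega)]
          congr 1
          rw [List.take_append_of_le_length (by omega)]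
          congr 1
          omega
        have ht2 : flat.take (prev.length + jn + 1) = prev ++ layer.take (jn + 1) := by
          rw [hf, List.flatMap_cons]
          simp only [id_eq]
          rw [List.take_append, List.take_of_length_le (by omega)]
          congr 1
          rw [List.take_append_of_le_length (by omega)]
          congr 1
          omega
        simp only [Function.comp, h1, h2, lookup_offsets flat _ 0 hk1,
          lookup_offsets flat _ 0 hk2, ht1, ht2, sumL_append, zero_add]

      have hstep : ((prev.length : Int) + (layer.length : Int))
          = (((prev ++ layer).length : Nat) : Int) := by
        push_cast [List.length_append]; ring
      simp only [List.foldl_cons]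
      rw [hmap, hstep, ih (prev ++ layer) _ hf']
      simp [confSpec, List.append_assoc]

-- ===== VERDICT (by name: the statement is the Claim_ definition above) =====
theorem cvt_vector_to_conf_py_spec : Claim_equal_cvt_vector_to_conf_py := by
  intro vector shape _
  unfold Spec_cvt_vector_to_conf_py cvt_vector_to_conf_py cvt_vector_to_conf_py_alt
  rw [offsets_eq]
  have hA := A_outer vector shape
  have hB := B_outer vector (shape.flatMap id) shape [] [] (by simp)
  rw [hA]
  simpa using hB.symm
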